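-- pv_equiv track=rewrite | github.com/thinkjin99/CODE_KING | Jeong_1339.py | getPrioNum
-- ===== SOURCE A (Python) =====
-- def getPrioNum(word):
--     result = 0
--     digit = len(word) - 1
--     for c in word:
--         if c == word[0]:
--             result += pow(10,digit) #첫 번쨰 알파벳의 잠재 값을 구한다.
--         digit -= 1
--     return result
-- ===== SOURCE B (Python) =====
-- def getPrioNum(word):
--     result = 0
--     for c in word:
--         result = result * 10 + (c == word[0])
--     return result
-- ===== Notes on version B (the rewrite author's own statement) =====
-- stated objective: faster
-- what changed: Replaces the decreasing position counter with pow(10,digit) accumulation by a single Horner-style pass (result = result*10 + match), eliminating the digit variable and the per-character pow-from-scratch computations.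
import Mathlib
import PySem

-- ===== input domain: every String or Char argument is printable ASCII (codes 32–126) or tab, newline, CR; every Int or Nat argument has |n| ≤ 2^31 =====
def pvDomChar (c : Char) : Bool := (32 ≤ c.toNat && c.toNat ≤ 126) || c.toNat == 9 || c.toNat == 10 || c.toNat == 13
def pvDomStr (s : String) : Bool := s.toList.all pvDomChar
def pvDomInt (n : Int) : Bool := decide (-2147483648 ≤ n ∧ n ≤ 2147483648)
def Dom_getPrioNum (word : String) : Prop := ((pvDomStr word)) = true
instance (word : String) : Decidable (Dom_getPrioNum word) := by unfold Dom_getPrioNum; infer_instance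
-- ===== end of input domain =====

-- B replaces the pow(10,digit) accumulation with a single Horner-style pass (result = result*10 + match): simpler, no position counter.


-- ===== PORT A =====
-- A: result starts 0, digit starts len-1; each char equal to word[0] adds 10^digit; digit decrements.
-- (word[0] is only read inside the loop, so the empty word returns 0 without raising; exponent is
-- always ≥ 0 when used, so Int exponent is represented as .toNat of the tracked counter.)
def getPrioNum (word : String) : Int :=
  let cs := word.toList
  (cs.foldl
    (fun (st : Int × Int) c =>
      ((if some c = cs.head? then st.1 + (10 : Int) ^ st.2.toNat else st.1), st.2 - 1))
    (0, (cs.length : Int) - 1)).1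

-- ===== PORT B =====
-- B: Horner pass, result = result*10 + (c == word[0]).
def getPrioNum_alt (word : String) : Int :=
  word.toList.foldl
    (fun (r : Int) c => r * 10 + (if some c = word.toList.head? then 1 else 0)) 0

-- ===== PRECONDITION & SPEC =====
def Spec_getPrioNum (word : String) (out : Int) : Prop := out = getPrioNum_alt word
instance (word : String) (out : Int) : Decidable (Spec_getPrioNum word out) := by unfold Spec_getPrioNum; infer_instance

-- ===== CLAIM (what is proved, stated in full; the proofs are below) =====
def Claim_equal_getPrioNum : Prop := ∀ (word : String), Dom_getPrioNum word → Spec_getPrioNum word (getPrioNum word)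

-- ===== LEMMAS AND PROOFS =====

-- B's Horner fold with arbitrary accumulator: shift the accumulator out front.
theorem bfold_shift (a : Option Char) (l : List Char) (r : Int) :
    l.foldl (fun (r : Int) c => r * 10 + (if some c = a then 1 else 0)) r
      = r * (10 : Int) ^ l.length
        + l.foldl (fun (r : Int) c => r * 10 + (if some c = a then 1 else 0)) 0 := by
  induction l generalizing r with
  | nil => simp
  | cons h t ih =>
    simp only [List.foldl_cons, List.length_cons]
    rw [ih, ih (0 * 10 + (if some h = a then 1 else 0))]
    ring

-- A's fold started at digit = len-1 equals accumulator plus B's fold from 0.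
theorem afold_eq_bfold (a : Option Char) (l : List Char) (r : Int) :
    (l.foldl
      (fun (st : Int × Int) c =>
        ((if some c = a then st.1 + (10 : Int) ^ st.2.toNat else st.1), st.2 - 1))
      (r, (l.length : Int) - 1)).1
      = r + l.foldl (fun (r : Int) c => r * 10 + (if some c = a then 1 else 0)) 0 := by
  induction l generalizing r with
  | nil => simp
  | cons h t ih =>
    simp only [List.foldl_cons, List.length_cons]
    have hcast : ((t.length + 1 : Nat) : Int) - 1 - 1 = (t.length : Int) - 1 := by
      push_cast; ring
    have htoNat : (((t.length + 1 : Nat) : Int) - 1).toNat = t.length := by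
      omega
    rw [hcast, ih, htoNat,
        bfold_shift a t (0 * 10 + (if some h = a then 1 else 0))]
    by_cases hc : some h = a <;> simp [hc] <;> ring

-- ===== VERDICT (by name: the statement is the Claim_ definition above) =====
theorem getPrioNum_spec : Claim_equal_getPrioNum := by
  intro word _
  show getPrioNum word = getPrioNum_alt word
  unfold getPrioNum getPrioNum_alt
  simpa using afold_eq_bfold word.toList.head? word.toList 0
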